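-- pv_equiv track=rewrite | github.com/adityas181/testing_repoo1 | agentcore/src/backend/base/agentcore/graph_langgraph/utils.py | filter_vertices_up_to_vertex
-- ===== SOURCE A (Python) =====
-- from collections import defaultdict, deque
--
-- def filter_vertices_up_to_vertex(
--     vertices_ids: list[str],
--     stop_vertex_id: str,
--     predecessor_map: dict[str, list[str]],
-- ) -> set[str]:
--     """Filter vertices to only include those that lead up to (are predecessors of) the stop vertex.
--
--     This function performs a breadth-first traversal backwards from the stop vertex,
--     collecting all vertices that are predecessors (directly or indirectly) of the stop vertex.
--     This is used for "Run Till Specific Component" functionality.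
--
--     Args:
--         vertices_ids: List of all vertex IDs in the graph
--         stop_vertex_id: ID of the vertex to stop at (will be included in result)
--         predecessor_map: Map of vertex ID -> list of predecessor vertex IDs
--
--     Returns:
--         Set of vertex IDs that lead to the stop vertex (including the stop vertex itself)
--
--     Example:
--         Given graph: A -> B -> C -> D
--         If stop_vertex_id = "C", returns {"A", "B", "C"}
--
--         Given graph:
--             A -> C
--             B -> C -> D
--         If stop_vertex_id = "C", returns {"A", "B", "C"}
--     """
--     vertices_set = set(vertices_ids)
--
--     # If stop vertex doesn't exist, return empty
--     if stop_vertex_id not in vertices_set: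
--         return set()
--
--     # Start with the target vertex
--     filtered_vertices = {stop_vertex_id}
--     queue = deque([stop_vertex_id])
--
--     # Process vertices in breadth-first order going backwards
--     while queue:
--         current_vertex = queue.popleft()
--         predecessors = predecessor_map.get(current_vertex, [])
--
--         for predecessor in predecessors:
--             if predecessor in vertices_set and predecessor not in filtered_vertices:
--                 filtered_vertices.add(predecessor)
--                 queue.append(predecessor)
--
--     return filtered_vertices
-- ===== SOURCE B (Python) =====
-- def filter_vertices_up_to_vertex(
--     vertices_ids: list[str],
--     stop_vertex_id: str,
--     predecessor_map: dict[str, list[str]],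
-- ) -> set[str]:
--     """Naive fixpoint iteration: repeatedly enlarge the collected set with the
--     valid predecessors of everything collected so far, until a whole round adds
--     nothing.  No queue and no per-vertex visitation bookkeeping at all."""
--     vertices_set = set(vertices_ids)
--
--     if stop_vertex_id not in vertices_set:
--         return set()
--
--     collected = {stop_vertex_id}
--     while True:
--         expanded = collected.union(
--             p
--             for v in collected
--             for p in predecessor_map.get(v, [])
--             if p in vertices_set
--         )
--         if len(expanded) == len(collected):
--             return collected
--         collected = expanded
-- ===== Notes on version B (the rewrite author's own statement) =====
-- stated objective: alternative
-- what changed: The BFS deque/visited loop that processes each vertex exactly once is replaced by a naive fixpoint iteration: each round rebuilds the set as collected union all valid predecessors of every collected vertex, stopping when a round adds nothing; there is no queue and no per-vertex visitation state.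
import Mathlib
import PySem

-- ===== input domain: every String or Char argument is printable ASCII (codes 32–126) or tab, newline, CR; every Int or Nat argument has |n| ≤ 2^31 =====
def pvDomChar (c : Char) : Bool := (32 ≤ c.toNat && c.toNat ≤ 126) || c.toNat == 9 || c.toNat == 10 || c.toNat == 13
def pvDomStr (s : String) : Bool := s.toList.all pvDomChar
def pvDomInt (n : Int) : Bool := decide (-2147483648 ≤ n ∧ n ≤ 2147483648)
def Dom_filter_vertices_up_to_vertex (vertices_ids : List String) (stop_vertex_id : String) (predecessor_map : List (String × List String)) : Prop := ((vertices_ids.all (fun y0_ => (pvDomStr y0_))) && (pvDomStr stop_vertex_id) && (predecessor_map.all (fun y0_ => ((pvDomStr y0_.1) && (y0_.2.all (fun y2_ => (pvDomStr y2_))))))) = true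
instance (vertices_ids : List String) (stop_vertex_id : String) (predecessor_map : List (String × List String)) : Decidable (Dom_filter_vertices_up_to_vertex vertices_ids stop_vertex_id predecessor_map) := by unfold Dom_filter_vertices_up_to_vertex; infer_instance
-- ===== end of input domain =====

-- B replaces A's BFS deque/visited loop by a naive fixpoint iteration (each round
-- re-expands the whole collected set until a round adds nothing); same set,
-- objective: alternative algorithm (no speed claim).


-- ===== PORT A =====
-- A's while-queue loop. Fuel: one unit per dequeue; every enqueued vertex is at
-- that moment freshly added to `filtered` ⊆ set(vertices_ids), so the number of
-- dequeues is at most |set(vertices_ids)| ≤ vertices_ids.length — the fuel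
-- `vertices_ids.length` passed below never runs out (a totality guard only).
def pvLoopA (vertices_set : PySem.Set String) (pm : PySem.Dict String (List String)) :
    Nat → PySem.Set String → List String → PySem.Set String
  | 0, filtered, _ => filtered
  | _ + 1, filtered, [] => filtered
  | fuel + 1, filtered, current_vertex :: queue =>
    let st := (pm.getD current_vertex []).foldl
      (fun st p =>
        if PySem.Set.contains vertices_set p && !(PySem.Set.contains st.1 p)
        then (PySem.Set.add st.1 p, st.2 ++ [p]) else st)
      (filtered, queue)
    pvLoopA vertices_set pm fuel st.1 st.2

def filter_vertices_up_to_vertex (vertices_ids : List String) (stop_vertex_id : String) (predecessor_map : List (String × List String)) : List String :=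
  let vertices_set := PySem.Set.ofList vertices_ids
  if !(PySem.Set.contains vertices_set stop_vertex_id) then PySem.Set.empty
  else
    pvLoopA vertices_set (PySem.Dict.ofList predecessor_map) vertices_ids.length
      (PySem.Set.add PySem.Set.empty stop_vertex_id) [stop_vertex_id]

-- ===== PORT B =====
-- B's round: collected.union(p for v in collected for p in pm.get(v, []) if p in vertices_set).
-- (Python iterates the set `collected` in hash order; the result is another set,
-- so it does not depend on that order — ported over the Set's element list.)
def pvRound (vertices_set : PySem.Set String) (pm : PySem.Dict String (List String))
    (collected : PySem.Set String) : PySem.Set String :=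
  PySem.Set.update collected
    (collected.flatMap (fun v => (pm.getD v []).filter (fun p => PySem.Set.contains vertices_set p)))

-- B's while-True loop. Fuel: every round before the last strictly grows
-- `collected` inside set(vertices_ids), which starts at size 1, so there are at
-- most vertices_ids.length rounds — the fuel passed below never runs out
-- (a totality guard only).
def pvLoopB (vertices_set : PySem.Set String) (pm : PySem.Dict String (List String)) :
    Nat → PySem.Set String → PySem.Set String
  | 0, collected => collected
  | fuel + 1, collected =>
    let expanded := pvRound vertices_set pm collected
    if expanded.length = collected.length then collected
    else pvLoopB vertices_set pm fuel expanded

def filter_vertices_up_to_vertex_alt (vertices_ids : List String) (stop_vertex_id : String) (predecessor_map : List (String × List String)) : List String :=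
  let vertices_set := PySem.Set.ofList vertices_ids
  if !(PySem.Set.contains vertices_set stop_vertex_id) then PySem.Set.empty
  else
    pvLoopB vertices_set (PySem.Dict.ofList predecessor_map) vertices_ids.length
      (PySem.Set.add PySem.Set.empty stop_vertex_id)

-- ===== PRECONDITION & SPEC =====
def Spec_filter_vertices_up_to_vertex (vertices_ids : List String) (stop_vertex_id : String) (predecessor_map : List (String × List String)) (out : List String) : Prop := out = filter_vertices_up_to_vertex_alt vertices_ids stop_vertex_id predecessor_map
instance (vertices_ids : List String) (stop_vertex_id : String) (predecessor_map : List (String × List String)) (out : List String) : Decidable (Spec_filter_vertices_up_to_vertex vertices_ids stop_vertex_id predecessor_map out) := by unfold Spec_filter_vertices_up_to_vertex; infer_instance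

-- ===== CLAIM (what is proved, stated in full; the proofs are below) =====
def Claim_equal_filter_vertices_up_to_vertex : Prop := ∀ (vertices_ids : List String) (stop_vertex_id : String) (predecessor_map : List (String × List String)), Dom_filter_vertices_up_to_vertex vertices_ids stop_vertex_id predecessor_map → Spec_filter_vertices_up_to_vertex vertices_ids stop_vertex_id predecessor_map (filter_vertices_up_to_vertex vertices_ids stop_vertex_id predecessor_map)

-- ===== LEMMAS AND PROOFS =====

-- The one-predecessor step of A's inner for-loop, named for the proofs.
def pvF (vs : PySem.Set String) (st : PySem.Set String × List String) (p : String) :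
    PySem.Set String × List String :=
  if PySem.Set.contains vs p && !(PySem.Set.contains st.1 p)
  then (PySem.Set.add st.1 p, st.2 ++ [p]) else st

theorem pvF_eta (vs : PySem.Set String) :
    (fun (st : PySem.Set String × List String) (p : String) =>
      if PySem.Set.contains vs p && !(PySem.Set.contains st.1 p)
      then (PySem.Set.add st.1 p, st.2 ++ [p]) else st) = pvF vs := rfl

-- A's whole-queue expansion, defined for the proofs only (not used by a port).
def pvExpand (vs : PySem.Set String) (pm : PySem.Dict String (List String))
    (st : PySem.Set String × List String) (frontier : List String) :
    PySem.Set String × List String :=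
  frontier.foldl (fun st vertex => (pm.getD vertex []).foldl (pvF vs) st) st

-- The set component of A's inner fold is a Set.update by the filtered predecessors.
theorem pvInner_fst (vs : PySem.Set String) (preds : List String)
    (s : PySem.Set String) (q : List String) :
    (preds.foldl (pvF vs) (s, q)).1 =
      PySem.Set.update s (preds.filter (fun p => PySem.Set.contains vs p)) := by
  induction preds generalizing s q with
  | nil => simp [PySem.Set.update]
  | cons p rest ih =>
    by_cases hvs : PySem.Set.contains vs p = true
    · rw [List.filter_cons_of_pos hvs, PySem.Set.update_cons]
      by_cases hsp : p ∈ s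
      · have hc : (PySem.Set.contains vs p && !(PySem.Set.contains s p)) = false := by
          rw [(PySem.Set.contains_iff s p).mpr hsp]; simp
        rw [List.foldl_cons]
        have hstep : pvF vs (s, q) p = (s, q) := by rw [pvF, hc]; simp
        rw [hstep, PySem.Set.add_of_mem hsp]
        exact ih s q
      · have hcs : PySem.Set.contains s p = false := by
          cases hcontains : PySem.Set.contains s p
          · rfl
          · exact absurd ((PySem.Set.contains_iff s p).mp hcontains) hsp
        have hc : (PySem.Set.contains vs p && !(PySem.Set.contains s p)) = true := by
          rw [hvs, hcs]; rfl
        rw [List.foldl_cons]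
        have hstep : pvF vs (s, q) p = (PySem.Set.add s p, q ++ [p]) := by rw [pvF, hc]; simp
        rw [hstep]
        exact ih (PySem.Set.add s p) (q ++ [p])
    · have hc : (PySem.Set.contains vs p && !(PySem.Set.contains s p)) = false := by
        rw [Bool.not_eq_true] at hvs; rw [hvs]; simp
      rw [List.filter_cons_of_neg hvs, List.foldl_cons]
      have hstep : pvF vs (s, q) p = (s, q) := by rw [pvF, hc]; simp
      rw [hstep]
      exact ih s q

-- Shifting the list accumulator out of the inner fold.
theorem pvInner_shift (vs : PySem.Set String) (preds : List String)
    (s : PySem.Set String) (q : List String) :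
    preds.foldl (pvF vs) (s, q) =
      ((preds.foldl (pvF vs) (s, [])).1, q ++ (preds.foldl (pvF vs) (s, [])).2) := by
  induction preds generalizing s q with
  | nil => simp
  | cons p rest ih =>
    simp only [List.foldl_cons, pvF, List.nil_append]
    by_cases hc : (PySem.Set.contains vs p && !(PySem.Set.contains s p)) = true
    · simp only [if_pos hc]
      rw [ih (PySem.Set.add s p) (q ++ [p]), ih (PySem.Set.add s p) [p]]
      simp
    · simp only [if_neg hc]
      exact ih s q

-- What the inner fold produces on a fresh accumulator.
theorem pvInner_delta (vs : PySem.Set String) (preds : List String) (s : PySem.Set String) :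
    (preds.foldl (pvF vs) (s, [])).1 = s ++ (preds.foldl (pvF vs) (s, [])).2 ∧
    (preds.foldl (pvF vs) (s, [])).2.Nodup ∧
    (∀ x ∈ (preds.foldl (pvF vs) (s, [])).2, x ∈ vs ∧ x ∉ s) := by
  induction preds generalizing s with
  | nil => simp
  | cons p rest ih =>
    simp only [List.foldl_cons, pvF, List.nil_append]
    by_cases hc : (PySem.Set.contains vs p && !(PySem.Set.contains s p)) = true
    · have hc' := hc
      simp only [Bool.and_eq_true, Bool.not_eq_true'] at hc'
      have hmem : p ∈ vs ∧ p ∉ s := by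
        refine ⟨(PySem.Set.contains_iff vs p).mp hc'.1, fun hps => ?_⟩
        rw [(PySem.Set.contains_iff s p).mpr hps] at hc'
        exact Bool.noConfusion hc'.2
      have hadd : PySem.Set.add s p = s ++ [p] := PySem.Set.add_of_not_mem hmem.2
      simp only [if_pos hc]
      rw [pvInner_shift vs rest (PySem.Set.add s p) [p], hadd]
      obtain ⟨ih1, ih2, ih3⟩ := ih (s ++ [p])
      refine ⟨?_, ?_, ?_⟩
      · simp [ih1]
      · simp only [List.singleton_append, List.nodup_cons]
        exact ⟨fun hpY => (ih3 p hpY).2 (by simp), ih2⟩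
      · intro x hx
        rcases List.mem_append.mp hx with hx | hx
        · simp only [List.mem_singleton] at hx; subst hx; exact hmem
        · have := ih3 x hx
          exact ⟨this.1, fun hxs => this.2 (List.mem_append_left _ hxs)⟩
    · simp only [if_neg hc]
      exact ih s

-- Shifting the list accumulator out of a whole-frontier expansion.
theorem pvExpand_shift (vs : PySem.Set String) (pm : PySem.Dict String (List String))
    (fr : List String) (s : PySem.Set String) (q : List String) :
    pvExpand vs pm (s, q) fr =
      ((pvExpand vs pm (s, []) fr).1, q ++ (pvExpand vs pm (s, []) fr).2) := by
  induction fr generalizing s q with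
  | nil => simp [pvExpand]
  | cons v fr ih =>
    simp only [pvExpand] at ih ⊢
    simp only [List.foldl_cons]
    obtain ⟨I, J, hIJ⟩ : ∃ I J, List.foldl (pvF vs) (s, []) (pm.getD v []) = (I, J) :=
      ⟨_, _, rfl⟩
    rw [pvInner_shift vs (pm.getD v []) s q, hIJ]
    dsimp only
    rw [ih I (q ++ J)]
    conv_rhs => rw [ih I J]
    simp [List.append_assoc]

-- The set component of a whole-frontier expansion is one of B's rounds' updates.
theorem pvExpand_fst (vs : PySem.Set String) (pm : PySem.Dict String (List String))
    (fr : List String) (s : PySem.Set String) (q : List String) :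
    (pvExpand vs pm (s, q) fr).1 =
      PySem.Set.update s
        (fr.flatMap (fun v => (pm.getD v []).filter (fun p => PySem.Set.contains vs p))) := by
  induction fr generalizing s q with
  | nil => simp [pvExpand, PySem.Set.update]
  | cons v fr ih =>
    simp only [pvExpand, List.foldl_cons, List.flatMap_cons] at ih ⊢
    obtain ⟨I, J, hIJ⟩ : ∃ I J, List.foldl (pvF vs) (s, q) (pm.getD v []) = (I, J) :=
      ⟨_, _, rfl⟩
    rw [hIJ, PySem.Set.update_append]
    have hI : I = PySem.Set.update s ((pm.getD v []).filter (fun p => PySem.Set.contains vs p)) := by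
      have := pvInner_fst vs (pm.getD v []) s q
      rw [hIJ] at this; exact this
    rw [← hI]
    exact ih I J

-- What one expansion produces: the set grows exactly by the delta list, which
-- is duplicate-free, inside vertices_set and disjoint from the old set.
theorem pvExpand_delta (vs : PySem.Set String) (pm : PySem.Dict String (List String))
    (fr : List String) (s : PySem.Set String) :
    (pvExpand vs pm (s, []) fr).1 = s ++ (pvExpand vs pm (s, []) fr).2 ∧
    (pvExpand vs pm (s, []) fr).2.Nodup ∧
    (∀ x ∈ (pvExpand vs pm (s, []) fr).2, x ∈ vs ∧ x ∉ s) := by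
  induction fr generalizing s with
  | nil => simp [pvExpand]
  | cons v fr ih =>
    have hd := pvInner_delta vs (pm.getD v []) s
    obtain ⟨I, J, hIJ⟩ : ∃ I J, List.foldl (pvF vs) (s, []) (pm.getD v []) = (I, J) :=
      ⟨_, _, rfl⟩
    rw [hIJ] at hd
    obtain ⟨hI1, hJ2, hJ3⟩ := hd
    dsimp only at hI1 hJ2 hJ3
    have hsh := pvExpand_shift vs pm fr I J
    simp only [pvExpand] at ih hsh ⊢
    simp only [List.foldl_cons]
    rw [hIJ, hsh]
    obtain ⟨ih1, ih2, ih3⟩ := ih I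
    refine ⟨?_, ?_, ?_⟩
    · dsimp only; rw [ih1, hI1, List.append_assoc]
    · dsimp only
      refine List.Nodup.append hJ2 ih2 ?_
      intro a haJ haY
      exact (ih3 a haY).2 (by rw [hI1]; exact List.mem_append_right _ haJ)
    · dsimp only
      intro x hx
      rcases List.mem_append.mp hx with hx | hx
      · exact hJ3 x hx
      · have := ih3 x hx
        rw [hI1] at this
        exact ⟨this.1, fun hxs => this.2 (List.mem_append_left _ hxs)⟩

-- A's queue loop, run through one whole block of its queue, is one expansion.
theorem pvLoopA_block (vs : PySem.Set String) (pm : PySem.Dict String (List String))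
    (q : List String) (f : Nat) (s : PySem.Set String) (r : List String) :
    pvLoopA vs pm (q.length + f) s (q ++ r) =
      pvLoopA vs pm f (pvExpand vs pm (s, []) q).1 (r ++ (pvExpand vs pm (s, []) q).2) := by
  induction q generalizing s r with
  | nil => simp [pvExpand]
  | cons v q ih =>
    have hlen : (v :: q).length + f = (q.length + f) + 1 := by simp [List.length_cons]; omega
    rw [hlen]
    simp only [List.cons_append, pvLoopA, pvF_eta]
    obtain ⟨I, J, hIJ⟩ : ∃ I J, List.foldl (pvF vs) (s, []) (pm.getD v []) = (I, J) :=
      ⟨_, _, rfl⟩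
    rw [pvInner_shift vs (pm.getD v []) s (q ++ r), hIJ]
    dsimp only
    rw [List.append_assoc, ih I (r ++ J)]
    have hexp : pvExpand vs pm (s, []) (v :: q) =
        ((pvExpand vs pm (I, []) q).1, J ++ (pvExpand vs pm (I, []) q).2) := by
      show pvExpand vs pm (List.foldl (pvF vs) (s, []) (pm.getD v [])) q = _
      rw [hIJ]
      exact pvExpand_shift vs pm q I J
    rw [hexp]
    dsimp only
    rw [List.append_assoc]

-- Updating by a list of elements already in the set changes nothing.
theorem pvUpdate_subset (s : PySem.Set String) (l : List String)
    (h : ∀ x ∈ l, x ∈ s) : PySem.Set.update s l = s := by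
  induction l generalizing s with
  | nil => rfl
  | cons x l ih =>
    rw [PySem.Set.update_cons, PySem.Set.add_of_mem (h x (by simp))]
    exact ih s (fun y hy => h y (by simp [hy]))

-- The closedness invariant: every valid predecessor of a processed vertex is in s.
def pvClosed (vs : PySem.Set String) (pm : PySem.Dict String (List String))
    (d s : PySem.Set String) : Prop :=
  ∀ v ∈ d, ∀ p ∈ pm.getD v [], p ∈ vs → p ∈ s

-- B's round on a state s = d ++ q with d closed equals A's expansion of q.
theorem pvRound_eq_expand (vs : PySem.Set String) (pm : PySem.Dict String (List String))
    (d q s : PySem.Set String) (hs : s = d ++ q)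
    (hcl : pvClosed vs pm d s) :
    pvRound vs pm s = (pvExpand vs pm (s, []) q).1 := by
  rw [pvExpand_fst, pvRound, hs, List.flatMap_append, PySem.Set.update_append]
  have hd : PySem.Set.update (d ++ q)
      (d.flatMap (fun v => (pm.getD v []).filter (fun p => PySem.Set.contains vs p))) = d ++ q := by
    apply pvUpdate_subset
    intro x hx
    obtain ⟨v, hv, hxp⟩ := List.mem_flatMap.mp hx
    obtain ⟨hxp', hxvs⟩ := List.mem_filter.mp hxp
    have := hcl v hv x hxp' ((PySem.Set.contains_iff vs x).mp hxvs)
    rwa [hs] at this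
  rw [hd]

-- With sufficient fuel, A's queue loop equals B's fixpoint loop.
theorem pvLoopA_eq_pvLoopB (vs : PySem.Set String) (pm : PySem.Dict String (List String))
    (fuelB : Nat) (fuelA : Nat) (d q s : PySem.Set String)
    (hs : s = d ++ q) (hnd : s.Nodup) (hsub : s ⊆ vs)
    (hcl : pvClosed vs pm d s)
    (hfA : q.length + (vs.length - s.length) ≤ fuelA)
    (hfB : 1 + (vs.length - s.length) ≤ fuelB) :
    pvLoopA vs pm fuelA s q = pvLoopB vs pm fuelB s := by
  induction fuelB using Nat.strong_induction_on generalizing fuelA d q s with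
  | _ fuelB IH =>
    obtain ⟨fB, rfl⟩ : ∃ fB, fuelB = fB + 1 := ⟨fuelB - 1, by omega⟩
    have hround := pvRound_eq_expand vs pm d q s hs hcl
    obtain ⟨hE1, hE2, hE3⟩ := pvExpand_delta vs pm q s
    rw [pvLoopB]
    by_cases hdelta : (pvExpand vs pm (s, []) q).2 = []
    · -- the round adds nothing: both loops return s
      have hfix : pvRound vs pm s = s := by rw [hround, hE1, hdelta, List.append_nil]
      rw [if_pos (by rw [hfix])]
      -- A side: the expansion of q leaves the set at s and the queue empty
      have hq : pvLoopA vs pm fuelA s q = s := by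
        obtain ⟨fA, rfl⟩ : ∃ fA, fuelA = q.length + fA := ⟨fuelA - q.length, by omega⟩
        have hblk := pvLoopA_block vs pm q fA s []
        rw [List.append_nil, List.nil_append] at hblk
        rw [hblk, hdelta, ← hround, hfix]
        cases fA <;> simp [pvLoopA]
      exact hq
    · -- the round adds the (nonempty, fresh) delta
      have hlen1 : 1 ≤ (pvExpand vs pm (s, []) q).2.length :=
        List.length_pos_iff.mpr hdelta
      have hne : ¬ (pvRound vs pm s).length = s.length := by
        rw [hround, hE1]; simp; omega
      rw [if_neg hne, hround]
      obtain ⟨fA, rfl⟩ : ∃ fA, fuelA = q.length + fA := ⟨fuelA - q.length, by omega⟩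
      have hblk := pvLoopA_block vs pm q fA s []
      rw [List.append_nil, List.nil_append] at hblk
      rw [hblk]
      set s' := (pvExpand vs pm (s, []) q).1 with hs'
      set q' := (pvExpand vs pm (s, []) q).2 with hq'
      have hnd' : s'.Nodup := by
        rw [hE1]
        exact List.Nodup.append hnd hE2 (fun a ha ha2 => (hE3 a ha2).2 ha)
      have hsub' : s' ⊆ vs := by
        rw [hE1]
        intro x hx
        rcases List.mem_append.mp hx with hx | hx
        · exact hsub hx
        · exact (hE3 x hx).1
      have hlenvs : s'.length ≤ vs.length :=
        (List.Nodup.subperm hnd' hsub').length_le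
      have hlens' : s'.length = s.length + q'.length := by rw [hE1]; simp
      have hcl' : pvClosed vs pm s s' := by
        intro v hv p hp hpvs
        rw [hs] at hv
        rcases List.mem_append.mp hv with hv | hv
        · have := hcl v hv p hp hpvs
          rw [hE1]; exact List.mem_append_left _ this
        · -- v was in the pending queue: p is in update s (flat q) = s'
          have hpmem : p ∈ q.flatMap (fun v => (pm.getD v []).filter (fun p => PySem.Set.contains vs p)) :=
            List.mem_flatMap.mpr ⟨v, hv, List.mem_filter.mpr ⟨hp, (PySem.Set.contains_iff vs p).mpr hpvs⟩⟩
          have : p ∈ PySem.Set.update s (q.flatMap (fun v => (pm.getD v []).filter (fun p => PySem.Set.contains vs p))) :=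
            (PySem.Set.mem_update _ _ _).mpr (Or.inr hpmem)
          rwa [← pvExpand_fst vs pm q s []] at this
      exact IH fB (by omega) fA s q' s' (by rw [hE1]) hnd' hsub' hcl'
        (by omega) (by omega)

-- ===== VERDICT (by name: the statement is the Claim_ definition above) =====
theorem filter_vertices_up_to_vertex_spec : Claim_equal_filter_vertices_up_to_vertex := by
  intro vertices_ids stop_vertex_id predecessor_map _
  unfold Spec_filter_vertices_up_to_vertex
  unfold filter_vertices_up_to_vertex filter_vertices_up_to_vertex_alt
  by_cases hm : stop_vertex_id ∈ vertices_ids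
  · have hvs : PySem.Set.contains (PySem.Set.ofList vertices_ids) stop_vertex_id = true :=
      (PySem.Set.contains_iff _ _).mpr ((PySem.Set.mem_ofList _ _).mpr hm)
    have hsadd : PySem.Set.add PySem.Set.empty stop_vertex_id = [stop_vertex_id] := by
      rw [PySem.Set.add_of_not_mem (by simp [PySem.Set.empty])]
      rfl
    simp only [hvs, Bool.not_true, Bool.false_eq_true, if_false, hsadd]
    have hlen1 : 1 ≤ (PySem.Set.ofList vertices_ids).length :=
      List.length_pos_iff.mpr (List.ne_nil_of_mem ((PySem.Set.mem_ofList vertices_ids stop_vertex_id).mpr hm))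
    have hlen2 : (PySem.Set.ofList vertices_ids).length ≤ vertices_ids.length :=
      PySem.Set.length_ofList_le vertices_ids
    apply pvLoopA_eq_pvLoopB (d := []) (q := [stop_vertex_id])
    · simp
    · simp
    · intro x hx
      simp only [List.mem_singleton] at hx
      rw [hx]
      exact (PySem.Set.mem_ofList vertices_ids stop_vertex_id).mpr hm
    · intro v hv
      simp at hv
    · simp only [List.length_cons, List.length_nil]
      omega
    · simp only [List.length_cons, List.length_nil]
      omega
  · simp [hm]
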